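-- pv_equiv track=rewrite | github.com/mrsxman/asadshakx_sh | massiv.py | bir_xil_qiymatga_ega_bolganlarni_ochir
-- ===== SOURCE A (Python) =====
-- def bir_xil_qiymatga_ega_bolganlarni_ochir(massiv):
--     olgan_qiymatlar = set()
--     qoshni_olmaganlar = []
--
--     for element in massiv:
--         if element not in olgan_qiymatlar:
--             olgan_qiymatlar.add(element)
--             qoshni_olmaganlar.append(element)
--
--     return qoshni_olmaganlar[-1:]
-- ===== SOURCE B (Python) =====
-- def bir_xil_qiymatga_ega_bolganlarni_ochir(massiv):
--     # rightmost element that is a FIRST occurrence = last element of the ordered dedup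
--     for i in range(len(massiv) - 1, -1, -1):
--         if massiv[i] not in massiv[:i]:
--             return [massiv[i]]
--     return []
-- ===== Notes on version B (the rewrite author's own statement) =====
-- stated objective: faster
-- what changed: Instead of building the ordered dedup list with a seen-set and slicing its last element, B scans the list from the right and returns the first (rightmost) element that does not occur earlier in the list, stopping as soon as it is found.
import Mathlib
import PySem

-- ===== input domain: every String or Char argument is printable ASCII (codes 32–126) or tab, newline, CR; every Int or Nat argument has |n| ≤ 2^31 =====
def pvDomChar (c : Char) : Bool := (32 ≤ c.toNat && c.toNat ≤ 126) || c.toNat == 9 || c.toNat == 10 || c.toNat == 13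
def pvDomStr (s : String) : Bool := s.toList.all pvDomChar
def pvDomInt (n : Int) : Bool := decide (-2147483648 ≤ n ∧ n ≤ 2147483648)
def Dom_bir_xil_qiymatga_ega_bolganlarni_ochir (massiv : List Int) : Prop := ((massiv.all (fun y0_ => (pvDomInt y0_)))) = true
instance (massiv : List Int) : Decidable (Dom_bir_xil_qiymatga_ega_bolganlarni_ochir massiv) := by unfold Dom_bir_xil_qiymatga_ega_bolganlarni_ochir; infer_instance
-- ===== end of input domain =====

-- B is an alternative decomposition (reverse scan for the rightmost first-occurrence element); return-value equivalence only.

-- ===== PORT A =====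
-- loop body: if element not in seen-set, add it to the set and append to the list
def pvStepA (s : PySem.Set Int × List Int) (e : Int) : PySem.Set Int × List Int :=
  if PySem.Set.contains s.1 e then s else (PySem.Set.add s.1 e, s.2 ++ [e])

def bir_xil_qiymatga_ega_bolganlarni_ochir (massiv : List Int) : List Int :=
  let st := massiv.foldl pvStepA (PySem.Set.empty, [])
  PySem.List.slice st.2 (some (-1)) none      -- qoshni_olmaganlar[-1:]

-- ===== PORT B =====
-- 'for i in range(len(massiv)-1, -1, -1): if massiv[i] not in massiv[:i]: return [massiv[i]]'
-- ported as structural recursion on the (one past the) current index, counting down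
def pvGoB (massiv : List Int) : Nat → List Int
  | 0 => []
  | n + 1 =>
    let e := PySem.List.pyGetD massiv (n : Int) 0
    if e ∈ PySem.List.slice massiv none (some (n : Int)) then pvGoB massiv n else [e]

def bir_xil_qiymatga_ega_bolganlarni_ochir_alt (massiv : List Int) : List Int :=
  pvGoB massiv massiv.length

-- ===== PRECONDITION & SPEC =====
def Spec_bir_xil_qiymatga_ega_bolganlarni_ochir (massiv : List Int) (out : List Int) : Prop := out = bir_xil_qiymatga_ega_bolganlarni_ochir_alt massiv
instance (massiv : List Int) (out : List Int) : Decidable (Spec_bir_xil_qiymatga_ega_bolganlarni_ochir massiv out) := by unfold Spec_bir_xil_qiymatga_ega_bolganlarni_ochir; infer_instance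

-- ===== CLAIM (what is proved, stated in full; the proofs are below) =====
def Claim_equal_bir_xil_qiymatga_ega_bolganlarni_ochir : Prop := ∀ (massiv : List Int), Dom_bir_xil_qiymatga_ega_bolganlarni_ochir massiv → Spec_bir_xil_qiymatga_ega_bolganlarni_ochir massiv (bir_xil_qiymatga_ega_bolganlarni_ochir massiv)

-- ===== LEMMAS AND PROOFS =====

-- A's paired fold keeps the seen-set and the output list equal as lists
theorem pvFoldA_pair (l : List Int) (d : List Int) :
    l.foldl pvStepA (d, d) = (l.foldl PySem.Set.add d, l.foldl PySem.Set.add d) := by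
  induction l generalizing d with
  | nil => rfl
  | cons e t ih =>
    simp only [List.foldl_cons, pvStepA, PySem.Set.add]
    split <;> simp_all

-- A computes drop (k-1) of the ordered dedup (k its length)
theorem pvA_eq (massiv : List Int) :
    bir_xil_qiymatga_ega_bolganlarni_ochir massiv =
      (PySem.Set.ofList massiv).drop ((PySem.Set.ofList massiv).length - 1) := by
  unfold bir_xil_qiymatga_ega_bolganlarni_ochir
  rw [show ((PySem.Set.empty : PySem.Set Int), ([] : List Int)) = (([] : List Int), ([] : List Int)) from rfl,
      pvFoldA_pair, PySem.Set.ofList_eq_foldl]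
  exact PySem.List.slice_from_neg_one _

-- B ignores a removed last element while scanning strictly below it
theorem pvGoB_prefix (l : List Int) (x : Int) (n : Nat) (h : n ≤ l.length) :
    pvGoB (l ++ [x]) n = pvGoB l n := by
  induction n with
  | zero => rfl
  | succ m ih =>
    have hm : m < l.length := by omega
    simp only [pvGoB, PySem.List.pyGetD_natCast, PySem.List.slice_to_natCast,
      List.take_append_of_le_length (by omega : m ≤ l.length),
      List.getD_append _ _ _ _ hm, ih (by omega)]

theorem pvB_eq (massiv : List Int) :
    bir_xil_qiymatga_ega_bolganlarni_ochir_alt massiv =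
      (PySem.Set.ofList massiv).drop ((PySem.Set.ofList massiv).length - 1) := by
  unfold bir_xil_qiymatga_ega_bolganlarni_ochir_alt
  induction massiv using List.reverseRecOn with
  | nil => rfl
  | append_singleton l x ih =>
    have hofl : PySem.Set.ofList (l ++ [x]) = PySem.Set.add (PySem.Set.ofList l) x := by
      simp [PySem.Set.ofList_eq_foldl]
    simp only [List.length_append, List.length_singleton, pvGoB,
      PySem.List.pyGetD_natCast, PySem.List.slice_to_natCast,
      List.take_append_of_le_length (le_refl l.length), List.take_length,
      List.getD_append_right _ _ _ _ (le_refl l.length), hofl, PySem.Set.add]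
    simp only [List.getD, List.getElem?_cons_zero, Nat.sub_self, Option.getD_some]
    by_cases hx : x ∈ l
    · simp [hx, pvGoB_prefix l x l.length (le_refl _), ih]
    · simp [hx]

-- ===== VERDICT (by name: the statement is the Claim_ definition above) =====
theorem bir_xil_qiymatga_ega_bolganlarni_ochir_spec : Claim_equal_bir_xil_qiymatga_ega_bolganlarni_ochir := by
  intro massiv _
  unfold Spec_bir_xil_qiymatga_ega_bolganlarni_ochir
  rw [pvA_eq, pvB_eq]
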